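-- pv_equiv track=rewrite | github.com/kuma5781/atcoder | binarySearch/a12/a12.py | search
-- ===== SOURCE A (Python) =====
-- def search(N, K, A):
--     L = 1
--     R = 10 ** 9
--     while L < R:
--         M = (L + R) // 2
--         sum = 0
--         for i in range(N):
--             sum += M // A[i]
--         if sum < K:
--             L = M + 1
--         if sum >= K:
--             R = M
--     return L
-- ===== SOURCE B (Python) =====
-- def search(N, K, A):
--     prefix = [A[i] for i in range(N)]
--
--     def go(L, R):
--         if L >= R:
--             return L
--         M = (L + R) // 2
--         if sum(M // a for a in prefix) >= K:
--             return go(L, M)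
--         return go(M + 1, R)
--
--     return go(1, 10 ** 9)
-- ===== Notes on version B (the rewrite author's own statement) =====
-- stated objective: alternative
-- what changed: Replaces the while-loop with mutable L/R and two sequential ifs by a recursive divide-and-conquer helper go(L,R) with a single if/else, and extracts the first N elements once up front instead of indexing A[i] inside every iteration.
import Mathlib
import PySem

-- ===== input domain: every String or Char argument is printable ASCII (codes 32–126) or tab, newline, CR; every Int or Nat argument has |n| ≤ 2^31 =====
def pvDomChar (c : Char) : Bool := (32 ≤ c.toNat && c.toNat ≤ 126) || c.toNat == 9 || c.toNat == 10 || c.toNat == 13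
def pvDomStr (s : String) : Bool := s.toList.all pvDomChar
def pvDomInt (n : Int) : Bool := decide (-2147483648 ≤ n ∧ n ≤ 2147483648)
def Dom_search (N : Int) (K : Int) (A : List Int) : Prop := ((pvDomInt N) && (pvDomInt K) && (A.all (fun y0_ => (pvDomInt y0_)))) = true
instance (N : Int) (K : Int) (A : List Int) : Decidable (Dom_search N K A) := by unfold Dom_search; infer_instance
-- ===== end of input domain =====

-- B replaces A's while-loop with mutable bounds and two sequential ifs by a recursive
-- divide-and-conquer helper over [L,R) with one if/else, on the first-N values extracted once up front.


-- midpoint bounds, needed for termination of both ports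
theorem pvMidLt {L R : Int} (h : L < R) : PySem.Int.floordiv (L + R) 2 < R := by
  rw [PySem.Int.floordiv_lt_iff_lt_mul (by omega : (0:Int) < 2)]; omega

theorem pvLeMid {L R : Int} (h : L < R) : L ≤ PySem.Int.floordiv (L + R) 2 := by
  rw [PySem.Int.le_floordiv_iff_mul_le (by omega : (0:Int) < 2)]; omega

-- ===== PORT A =====
-- the while-loop of A: state (L, R), two sequential ifs on the same unchanged sum
def searchGo (N : Int) (K : Int) (A : List Int) (L : Int) (R : Int) : Int :=
  if h : L < R then
    let M := PySem.Int.floordiv (L + R) 2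
    let s := (PySem.List.pyRange 0 N 1).foldl
      (fun acc i => acc + PySem.Int.floordiv M (PySem.List.pyGetD A i 0)) 0
    let L' := if s < K then M + 1 else L
    let R' := if s ≥ K then M else R
    searchGo N K A L' R'
  else L
termination_by (R - L).toNat
decreasing_by
  have h1 := pvLeMid h
  have h2 := pvMidLt h
  split <;> split <;> omega

def search (N : Int) (K : Int) (A : List Int) : Int :=
  searchGo N K A 1 (10 ^ 9)

-- ===== PORT B =====
def searchAltGo (K : Int) (pre : List Int) (L : Int) (R : Int) : Int :=
  if h : L ≥ R then L
  else
    let M := PySem.Int.floordiv (L + R) 2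
    if (pre.foldl (fun acc a => acc + PySem.Int.floordiv M a) 0) ≥ K then
      searchAltGo K pre L M
    else
      searchAltGo K pre (M + 1) R
termination_by (R - L).toNat
decreasing_by
  · have h1 := pvMidLt (by omega : L < R)
    have h2 := pvLeMid (by omega : L < R)
    omega
  · have h1 := pvMidLt (by omega : L < R)
    have h2 := pvLeMid (by omega : L < R)
    omega

def search_alt (N : Int) (K : Int) (A : List Int) : Int :=
  let pre := (PySem.List.pyRange 0 N 1).map (fun i => PySem.List.pyGetD A i 0)
  searchAltGo K pre 1 (10 ^ 9)

-- ===== PRECONDITION & SPEC =====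
-- Pre_ excludes exactly the inputs where Python A raises: N beyond len(A) (IndexError)
-- or a zero among the first N elements (ZeroDivisionError).
def Pre_search (N : Int) (K : Int) (A : List Int) : Prop :=
  N ≤ (A.length : Int) ∧ ∀ a ∈ A.take N.toNat, a ≠ 0
instance (N : Int) (K : Int) (A : List Int) : Decidable (Pre_search N K A) := by
  unfold Pre_search; infer_instance

def pvWitness_search : Int × Int × List Int := (2, 3, [1, 2])

def Spec_search (N : Int) (K : Int) (A : List Int) (out : Int) : Prop := out = search_alt N K A
instance (N : Int) (K : Int) (A : List Int) (out : Int) : Decidable (Spec_search N K A out) := by unfold Spec_search; infer_instance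

-- ===== CLAIM (what is proved, stated in full; the proofs are below) =====
def Claim_equal_search : Prop := ∀ (N : Int) (K : Int) (A : List Int), Dom_search N K A → Pre_search N K A → Spec_search N K A (search N K A)

-- ===== LEMMAS AND PROOFS =====

-- the two recursions agree step for step once the sums agree
theorem pvGoEq (N : Int) (K : Int) (A : List Int) (pre : List Int)
    (hsum : ∀ M, (PySem.List.pyRange 0 N 1).foldl
      (fun acc i => acc + PySem.Int.floordiv M (PySem.List.pyGetD A i 0)) 0
      = pre.foldl (fun acc a => acc + PySem.Int.floordiv M a) 0) :
    ∀ (m : Nat) (L R : Int), (R - L).toNat ≤ m →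
      searchGo N K A L R = searchAltGo K pre L R := by
  intro m
  induction m with
  | zero =>
    intro L R hm
    have h : ¬ L < R := by omega
    rw [searchGo, searchAltGo, dif_neg h, dif_pos (show L ≥ R by omega)]
  | succ m ih =>
    intro L R hm
    rw [searchGo, searchAltGo]
    by_cases h : L < R
    · have h1 := pvLeMid h
      have h2 := pvMidLt h
      simp only [dif_pos h, dif_neg (show ¬ L ≥ R by omega), hsum]
      by_cases hs : (pre.foldl (fun acc a =>
          acc + PySem.Int.floordiv (PySem.Int.floordiv (L + R) 2) a) 0) ≥ K
      · rw [if_neg (show ¬ (pre.foldl (fun acc a =>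
            acc + PySem.Int.floordiv (PySem.Int.floordiv (L + R) 2) a) 0) < K by omega),
          if_pos hs, if_pos hs]
        exact ih L _ (by omega)
      · rw [if_pos (show (pre.foldl (fun acc a =>
            acc + PySem.Int.floordiv (PySem.Int.floordiv (L + R) 2) a) 0) < K by omega),
          if_neg hs, if_neg hs]
        exact ih _ R (by omega)
    · rw [dif_neg h, dif_pos (show L ≥ R by omega)]

-- ===== VERDICT (by name: the statement is the Claim_ definition above) =====
theorem search_spec : Claim_equal_search := by
  intro N K A _ _
  unfold Spec_search search search_alt
  exact pvGoEq N K A _ (fun M => by rw [List.foldl_map]) ((10 ^ 9 - 1 : Int)).toNat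
    1 (10 ^ 9) (by norm_num)
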